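-- pv_equiv track=rewrite | github.com/CaseyRyback126/python_home_works | Sem3HomeWorks/Product_of pairs.py | pairs_prod
-- ===== SOURCE A (Python) =====
-- def pairs_prod(numbers):
--     results = []
--     while len(numbers) > 1:
--         results.append(numbers[0] * numbers[-1])
--         del numbers[0]
--         del numbers[-1]
--     if len(numbers) == 1:
--         results.append(numbers[0] ** 2)
--     return results
-- ===== SOURCE B (Python) =====
-- def pairs_prod(numbers):
--     # O(n) index walk; unlike A, does not mutate the caller's list
--     n = len(numbers)
--     return [numbers[i] * numbers[n - 1 - i] for i in range((n + 1) // 2)]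
-- ===== Notes on version B (the rewrite author's own statement) =====
-- stated objective: faster
-- what changed: Replace the destructive while-loop that repeatedly deletes the first element (an O(n) shift each time) with a single indexed comprehension pairing numbers[i] with numbers[n-1-i]; B also leaves the input list unmodified.
import Mathlib
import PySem

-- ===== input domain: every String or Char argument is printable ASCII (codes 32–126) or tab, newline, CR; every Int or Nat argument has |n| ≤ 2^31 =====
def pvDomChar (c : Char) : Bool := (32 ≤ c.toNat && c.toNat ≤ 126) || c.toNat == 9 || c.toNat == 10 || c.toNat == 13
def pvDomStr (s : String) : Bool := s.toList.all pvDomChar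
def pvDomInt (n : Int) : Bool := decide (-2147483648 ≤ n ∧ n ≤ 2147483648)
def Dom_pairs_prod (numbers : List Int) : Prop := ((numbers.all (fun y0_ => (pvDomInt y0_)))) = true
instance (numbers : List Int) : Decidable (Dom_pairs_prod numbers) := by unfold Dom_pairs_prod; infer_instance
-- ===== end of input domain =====

-- B replaces A's destructive delete-both-ends loop by one O(n) indexed pass; equivalence is about
-- the return value only: Python A empties the caller's list in place, B leaves it untouched.

-- ===== PORT A =====
-- A: while len > 1, append numbers[0]*numbers[-1], del first (tail), del last (dropLast);
-- then if one element remains, append its square.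
def pairs_prod (numbers : List Int) : List Int :=
  if numbers.length > 1 then
    (numbers.headD 0 * numbers.getLastD 0) :: pairs_prod (numbers.tail.dropLast)
  else if numbers.length == 1 then [numbers.headD 0 * numbers.headD 0]
  else []
termination_by numbers.length
decreasing_by simp; omega

-- ===== PORT B =====
-- B: [numbers[i] * numbers[n-1-i] for i in range((n+1)//2)] — all indices in range
def pairs_prod_alt (numbers : List Int) : List Int :=
  let n := numbers.length
  (List.range ((n + 1) / 2)).map (fun i => numbers.getD i 0 * numbers.getD (n - 1 - i) 0)

-- ===== PRECONDITION & SPEC =====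
def Spec_pairs_prod (numbers : List Int) (out : List Int) : Prop := out = pairs_prod_alt numbers
instance (numbers : List Int) (out : List Int) : Decidable (Spec_pairs_prod numbers out) := by unfold Spec_pairs_prod; infer_instance

-- ===== CLAIM (what is proved, stated in full; the proofs are below) =====
def Claim_equal_pairs_prod : Prop := ∀ (numbers : List Int), Dom_pairs_prod numbers → Spec_pairs_prod numbers (pairs_prod numbers)

-- ===== LEMMAS AND PROOFS =====

lemma alt_concat (a b : Int) (mid : List Int) :
    pairs_prod_alt (a :: (mid ++ [b])) = (a * b) :: pairs_prod_alt mid := by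
  unfold pairs_prod_alt
  simp only [List.length_cons, List.length_append, List.length_nil]
  apply List.ext_getElem
  · simp only [List.length_map, List.length_range, List.length_cons]
    omega
  · intro j h1 h2
    simp only [List.length_map, List.length_range] at h1
    simp only [List.getElem_map, List.getElem_range]
    rcases j with _ | j
    · simp only [List.getElem_cons_zero, List.getD_cons_zero]
      have h3 : mid.length + 0 + 1 + 1 - 1 - 0 = mid.length + 1 := by omega
      rw [h3, List.getD_cons_succ, List.getD_eq_getElem?_getD,
        List.getElem?_append_right (le_refl _)]
      simp
    · have hm : j < (mid.length + 1) / 2 := by omega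
      have hjm : j < mid.length := by omega
      simp only [List.getElem_cons_succ, List.getElem_map, List.getElem_range,
        List.getD_cons_succ]
      have h4 : mid.length + 0 + 1 + 1 - 1 - (j + 1) = (mid.length - 1 - j) + 1 := by omega
      rw [h4, List.getD_cons_succ, List.getD_append _ _ _ _ hjm,
        List.getD_append _ _ _ _ (by omega)]

theorem pairs_eq (numbers : List Int) : pairs_prod numbers = pairs_prod_alt numbers := by
  induction hn : numbers.length using Nat.strong_induction_on generalizing numbers with
  | _ n ih =>
    rcases numbers with _ | ⟨a, rest⟩
    · rw [pairs_prod]; rfl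
    · rcases rest.eq_nil_or_concat with hr | ⟨mid, b, hr⟩
      · subst hr
        rw [pairs_prod]
        simp [pairs_prod_alt, List.range_succ]
      · subst hr
        simp only [List.concat_eq_append]
        rw [pairs_prod]
        have hlen : (a :: (mid ++ [b])).length > 1 := by simp
        rw [if_pos hlen]
        have hlast : (a :: (mid ++ [b])).getLastD 0 = b := by
          rw [List.getLastD_eq_getLast?, ← List.cons_append, List.getLast?_append]
          rfl
        simp only [List.headD_cons, List.tail_cons, List.dropLast_concat, hlast]
        rw [alt_concat, ih mid.length (by simp at hn; omega) mid rfl]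

-- ===== VERDICT (by name: the statement is the Claim_ definition above) =====
theorem pairs_prod_spec : Claim_equal_pairs_prod := by
  intro numbers _
  exact pairs_eq numbers
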